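-- pv_equiv track=rewrite | github.com/manifold-inc/hone | miner-sr/inference.py | _pattern_complete
-- ===== SOURCE A (Python) =====
-- from typing import List, Dict, Optional
--
-- def _pattern_complete(grid: List[List[int]]) -> List[List[int]]:
--     """Try to complete patterns in the grid"""
--     h, w = len(grid), len(grid[0]) if grid else 0
--
--     if h < 3 or w < 3:
--         return grid
--
--     result = [row[:] for row in grid]
--     for i in range(h):
--         if result[i][0] == result[i][-1] and result[i][0] != 0:
--             for j in range(1, w // 2):
--                 if result[i][j] == 0:
--                     result[i][j] = result[i][w - 1 - j]
--                 elif result[i][w - 1 - j] == 0: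
--                     result[i][w - 1 - j] = result[i][j]
--
--     return result
-- ===== SOURCE B (Python) =====
-- def _complete_row(row, w):
--     if not (row[0] == row[-1] != 0):
--         return row[:]
--     return [row[w - 1 - k] if 1 <= k <= w - 2 and 2 * k != w - 1 and row[k] == 0 else row[k]
--             for k in range(len(row))]
--
--
-- def _pattern_complete(grid):
--     """Try to complete patterns in the grid"""
--     h, w = len(grid), len(grid[0]) if grid else 0
--
--     if h < 3 or w < 3:
--         return grid
--
--     return [_complete_row(row, w) for row in grid]
-- ===== Notes on version B (the rewrite author's own statement) =====
-- stated objective: simpler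
-- what changed: B builds the result as a per-row/per-cell comprehension that computes every cell from the original row by one symmetric mirror-fill rule, instead of mutating a copied grid in place over half-width index pairs with an if/elif on each pair.
import Mathlib
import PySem

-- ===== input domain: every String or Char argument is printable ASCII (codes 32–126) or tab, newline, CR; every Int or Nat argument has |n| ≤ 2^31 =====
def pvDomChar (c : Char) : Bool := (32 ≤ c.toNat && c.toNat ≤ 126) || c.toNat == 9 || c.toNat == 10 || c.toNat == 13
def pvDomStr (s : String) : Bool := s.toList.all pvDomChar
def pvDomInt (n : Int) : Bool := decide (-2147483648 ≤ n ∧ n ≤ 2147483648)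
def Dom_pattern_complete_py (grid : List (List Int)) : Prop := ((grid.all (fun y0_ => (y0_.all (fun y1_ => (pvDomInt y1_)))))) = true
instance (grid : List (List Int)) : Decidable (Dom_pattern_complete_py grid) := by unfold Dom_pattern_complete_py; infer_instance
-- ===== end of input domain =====

-- B rebuilds each row functionally (one mirror-fill rule per cell) instead of A's in-place
-- mutation of a copied grid over half-width index pairs; objective: simpler. Neither mutates its argument.

-- ===== PORT A =====
-- Indices here are Nats in range under Pre_ (row[-1] is ported as getD (len-1), exact on the
-- nonempty rows Pre_ admits), so List.getD/List.set are exact ports of Python indexing/assignment.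
-- one iteration of A's inner loop body for index j (if/elif on result[i][j], result[i][w-1-j])
def pvStepA (w : Nat) (row : List Int) (j : Nat) : List Int :=
  if row.getD j 0 = 0 then row.set j (row.getD (w - 1 - j) 0)
  else if row.getD (w - 1 - j) 0 = 0 then row.set (w - 1 - j) (row.getD j 0)
  else row

-- the body of A's outer loop for one row: the guard, then 'for j in range(1, w//2)'
def pvRowA (w : Nat) (row : List Int) : List Int :=
  if row.getD 0 0 = row.getD (row.length - 1) 0 ∧ row.getD 0 0 ≠ 0 then
    (List.range' 1 (w / 2 - 1)).foldl (pvStepA w) row   -- range(1, w//2) has w//2 - 1 elements here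
  else row

def pattern_complete_py (grid : List (List Int)) : List (List Int) :=
  let h := grid.length
  let w := match grid with | [] => 0 | r :: _ => r.length
  if h < 3 ∨ w < 3 then grid
  else
    let result := grid.map (fun row => row)     -- [row[:] for row in grid]
    (List.range h).foldl (fun res i => res.set i (pvRowA w (res.getD i []))) result

-- ===== PORT B =====
-- value of cell k of the completed row, computed from the original row only
def pvCellB (row : List Int) (w : Nat) (k : Nat) : Int :=
  if 1 ≤ k ∧ k ≤ w - 2 ∧ 2 * k ≠ w - 1 ∧ row.getD k 0 = 0 then row.getD (w - 1 - k) 0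
  else row.getD k 0

def pvCompleteRow (row : List Int) (w : Nat) : List Int :=
  if row.getD 0 0 = row.getD (row.length - 1) 0 ∧ row.getD 0 0 ≠ 0 then
    (List.range row.length).map (pvCellB row w)   -- the comprehension over range(len(row))
  else row                                        -- row[:]

def pattern_complete_py_alt (grid : List (List Int)) : List (List Int) :=
  let h := grid.length
  let w := match grid with | [] => 0 | r :: _ => r.length
  if h < 3 ∨ w < 3 then grid
  else grid.map (fun row => pvCompleteRow row w)

-- ===== PRECONDITION & SPEC =====
-- Pre_ excludes exactly the inputs where A raises IndexError: when h ≥ 3 and w ≥ 3, an empty row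
-- (row[0]/row[-1]), or a row triggering the mirror guard that is shorter than w-1 while w ≥ 4
-- (the inner loop then reads row[w-2] out of range). A returns on every other input.
def Pre_pattern_complete_py (grid : List (List Int)) : Prop :=
  grid.length < 3 ∨ (grid.headD []).length < 3 ∨
    ∀ row ∈ grid, 0 < row.length ∧
      (4 ≤ (grid.headD []).length ∧ row.getD 0 0 = row.getD (row.length - 1) 0 ∧ row.getD 0 0 ≠ 0 →
        (grid.headD []).length - 1 ≤ row.length)
instance (grid : List (List Int)) : Decidable (Pre_pattern_complete_py grid) := by
  unfold Pre_pattern_complete_py; infer_instance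

def pvWitness_pattern_complete_py : List (List Int) := [[1, 0, 2, 1], [1, 2, 0, 1], [0, 0, 0, 0]]

def Spec_pattern_complete_py (grid : List (List Int)) (out : List (List Int)) : Prop := out = pattern_complete_py_alt grid
instance (grid : List (List Int)) (out : List (List Int)) : Decidable (Spec_pattern_complete_py grid out) := by unfold Spec_pattern_complete_py; infer_instance

-- ===== CLAIM (what is proved, stated in full; the proofs are below) =====
def Claim_equal_pattern_complete_py : Prop := ∀ (grid : List (List Int)), Dom_pattern_complete_py grid → Pre_pattern_complete_py grid → Spec_pattern_complete_py grid (pattern_complete_py grid)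

-- ===== LEMMAS AND PROOFS =====

-- the outer fold "result[i] = f(result[i]) for i in range(h)" is a map
theorem pv_foldl_set_shift (f : List Int → List Int) (idxs : List Nat) :
    ∀ (a : List Int) (ys : List (List Int)),
      idxs.foldl (fun res i => res.set (i + 1) (f (res.getD (i + 1) []))) (a :: ys)
        = a :: idxs.foldl (fun res i => res.set i (f (res.getD i []))) ys := by
  induction idxs with
  | nil => intro a ys; rfl
  | cons i idxs ih =>
    intro a ys
    simp only [List.foldl_cons, List.set_cons_succ, List.getD_cons_succ]
    exact ih a _

theorem pv_foldl_set_map (f : List Int → List Int) :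
    ∀ (l : List (List Int)),
      (List.range l.length).foldl (fun res i => res.set i (f (res.getD i []))) l = l.map f := by
  intro l
  induction l with
  | nil => rfl
  | cons x l ih =>
    rw [List.length_cons, List.range_succ_eq_map]
    simp only [List.foldl_cons, List.foldl_map, List.set_cons_zero, List.getD_cons_zero]
    rw [pv_foldl_set_shift f _ (f x) l]
    rw [ih]
    rfl

-- getD after an in-range set
theorem pv_getD_set (l : List Int) (i k : Nat) (v : Int) (hi : i < l.length) :
    (l.set i v).getD k 0 = if k = i then v else l.getD k 0 := by
  by_cases h : k = i
  · subst h
    simp [List.getD_eq_getElem?_getD, hi]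
  · simp [List.getD_eq_getElem?_getD, List.getElem?_set_ne (fun hh => h hh.symm), h]

-- invariant of A's inner loop over j = 1 .. n: cells 1..n and w-1-n..w-2 hold the mirror-filled
-- value, all other cells the original value; the loop never changes the length
theorem pv_inner_inv (w : Nat) (row : List Int) (hw : 4 ≤ w) (hlen : w - 1 ≤ row.length) :
    ∀ n, n ≤ w / 2 - 1 →
      ((List.range' 1 n).foldl (pvStepA w) row).length = row.length ∧
      ∀ k, ((List.range' 1 n).foldl (pvStepA w) row).getD k 0 =
        if ((1 ≤ k ∧ k ≤ n) ∨ (w - 1 - n ≤ k ∧ k ≤ w - 2)) ∧ row.getD k 0 = 0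
        then row.getD (w - 1 - k) 0 else row.getD k 0 := by
  intro n
  induction n with
  | zero =>
    intro _
    refine ⟨rfl, fun k => ?_⟩
    have hno : ¬ (((1 ≤ k ∧ k ≤ 0) ∨ (w - 1 - 0 ≤ k ∧ k ≤ w - 2)) ∧ row.getD k 0 = 0) := by
      rintro ⟨h1 | h2, _⟩ <;> omega
    rw [if_neg hno]
    rfl
  | succ n ih =>
    intro hn
    obtain ⟨hL, hG⟩ := ih (by omega)
    have hrange : List.range' 1 (n + 1) = List.range' 1 n ++ [n + 1] := by
      simpa [Nat.add_comm] using (List.range'_concat (step := 1) (s := 1) (n := n))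
    rw [hrange, List.foldl_append, List.foldl_cons, List.foldl_nil]
    set r := (List.range' 1 n).foldl (pvStepA w) row with hr
    have e1 : w - 1 - (n + 1) = w - 2 - n := by omega
    have hread1 : r.getD (n + 1) 0 = row.getD (n + 1) 0 := by
      rw [hG (n + 1), if_neg]; rintro ⟨h1 | h2, _⟩ <;> omega
    have hread2 : r.getD (w - 2 - n) 0 = row.getD (w - 2 - n) 0 := by
      rw [hG (w - 2 - n), if_neg]; rintro ⟨h1 | h2, _⟩ <;> omega
    have hin1 : n + 1 < r.length := by omega
    have hin2 : w - 2 - n < r.length := by omega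
    have hmirror : w - 1 - (w - 2 - n) = n + 1 := by omega
    unfold pvStepA
    rw [e1, hread1, hread2]
    split_ifs with hz1 hz2
    · -- row[n+1] == 0: result[n+1] := result[w-2-n]
      refine ⟨by rw [List.length_set]; exact hL, fun k => ?_⟩
      rw [pv_getD_set r (n + 1) k _ hin1]
      by_cases hk1 : k = n + 1
      · subst hk1
        rw [if_pos rfl, if_pos ⟨Or.inl ⟨by omega, le_refl _⟩, hz1⟩, e1]
      · rw [if_neg hk1, hG k]
        by_cases hk2 : k = w - 2 - n
        · subst hk2
          by_cases hz : row.getD (w - 2 - n) 0 = 0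
          · rw [if_neg, if_pos ⟨Or.inr ⟨by omega, by omega⟩, hz⟩, hmirror, hz1, hz]
            rintro ⟨h1 | h2, _⟩ <;> omega
          · rw [if_neg (fun h => hz h.2), if_neg (fun h => hz h.2)]
        · have hreg : ((1 ≤ k ∧ k ≤ n + 1) ∨ (w - 2 - n ≤ k ∧ k ≤ w - 2)) ↔
              ((1 ≤ k ∧ k ≤ n) ∨ (w - 1 - n ≤ k ∧ k ≤ w - 2)) := by omega
          simp only [hreg]
    · -- row[n+1] != 0, row[w-2-n] == 0: result[w-2-n] := result[n+1]
      refine ⟨by rw [List.length_set]; exact hL, fun k => ?_⟩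
      rw [pv_getD_set r (w - 2 - n) k _ hin2]
      by_cases hk2 : k = w - 2 - n
      · subst hk2
        rw [if_pos rfl, if_pos ⟨Or.inr ⟨by omega, by omega⟩, hz2⟩, hmirror]
      · rw [if_neg hk2, hG k]
        by_cases hk1 : k = n + 1
        · subst hk1
          rw [if_neg (fun h => hz1 h.2), if_neg (fun h => hz1 h.2)]
        · have hreg : ((1 ≤ k ∧ k ≤ n + 1) ∨ (w - 2 - n ≤ k ∧ k ≤ w - 2)) ↔
              ((1 ≤ k ∧ k ≤ n) ∨ (w - 1 - n ≤ k ∧ k ≤ w - 2)) := by omega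
          simp only [hreg]
    · -- both nonzero: no write
      refine ⟨hL, fun k => ?_⟩
      rw [hG k]
      by_cases hk1 : k = n + 1
      · subst hk1
        rw [if_neg (fun h => hz1 h.2), if_neg (fun h => hz1 h.2)]
      · by_cases hk2 : k = w - 2 - n
        · subst hk2
          rw [if_neg (fun h => hz2 h.2), if_neg (fun h => hz2 h.2)]
        · have hreg : ((1 ≤ k ∧ k ≤ n + 1) ∨ (w - 2 - n ≤ k ∧ k ≤ w - 2)) ↔
              ((1 ≤ k ∧ k ≤ n) ∨ (w - 1 - n ≤ k ∧ k ≤ w - 2)) := by omega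
          simp only [hreg]

-- per-row equality of the two programs
theorem pv_row_eq (w : Nat) (hw : 3 ≤ w) (row : List Int)
    (hlen : row.getD 0 0 = row.getD (row.length - 1) 0 ∧ row.getD 0 0 ≠ 0 →
      w = 3 ∨ w - 1 ≤ row.length) :
    pvRowA w row = pvCompleteRow row w := by
  unfold pvRowA pvCompleteRow
  split_ifs with htrig
  · by_cases hw3 : w = 3
    · subst hw3
      simp only [List.range']
      rw [List.foldl_nil]
      refine List.ext_getElem (by simp) (fun i h1 h2 => ?_)
      simp only [List.getElem_map, List.getElem_range]
      unfold pvCellB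
      rw [if_neg (by rintro ⟨a, b, c, d⟩; omega)]
      simp [List.getD_eq_getElem?_getD, List.getElem?_eq_getElem h1]
    · have hw4 : 4 ≤ w := by omega
      have hge : w - 1 ≤ row.length := by rcases hlen htrig with h | h; omega; exact h
      obtain ⟨hL, hG⟩ := pv_inner_inv w row hw4 hge (w / 2 - 1) (le_refl _)
      refine List.ext_getElem (by simp [hL]) (fun i hi1 hi2 => ?_)
      have hi : i < row.length := by omega
      have hgd : ((List.range' 1 (w / 2 - 1)).foldl (pvStepA w) row).getD i 0
          = ((List.range' 1 (w / 2 - 1)).foldl (pvStepA w) row)[i] := by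
        simp [List.getD_eq_getElem?_getD, List.getElem?_eq_getElem hi1]
      rw [← hgd, hG i]
      simp only [List.getElem_map, List.getElem_range]
      unfold pvCellB
      have hreg : (((1 ≤ i ∧ i ≤ w / 2 - 1) ∨ (w - 1 - (w / 2 - 1) ≤ i ∧ i ≤ w - 2)))
          ↔ (1 ≤ i ∧ i ≤ w - 2 ∧ 2 * i ≠ w - 1) := by omega
      by_cases hz : row.getD i 0 = 0
      · by_cases hr : 1 ≤ i ∧ i ≤ w - 2 ∧ 2 * i ≠ w - 1
        · rw [if_pos ⟨hreg.mpr hr, hz⟩, if_pos ⟨hr.1, hr.2.1, hr.2.2, hz⟩]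
        · rw [if_neg (fun h => hr (hreg.mp h.1)), if_neg (fun h => hr ⟨h.1, h.2.1, h.2.2.1⟩)]
      · rw [if_neg (fun h => hz h.2), if_neg (fun h => hz h.2.2.2)]
  · rfl

-- ===== VERDICT (by name: the statement is the Claim_ definition above) =====
theorem pattern_complete_py_spec : Claim_equal_pattern_complete_py := by
  intro grid _ hpre
  unfold Spec_pattern_complete_py pattern_complete_py pattern_complete_py_alt
  cases grid with
  | nil => rfl
  | cons r rest =>
    simp only []
    by_cases hsmall : (r :: rest).length < 3 ∨ r.length < 3
    · rw [if_pos hsmall, if_pos hsmall]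
    · rw [if_neg hsmall, if_neg hsmall]
      push Not at hsmall
      rw [List.map_id']
      rw [pv_foldl_set_map (pvRowA r.length) (r :: rest)]
      refine List.map_congr_left (fun row hrow => ?_)
      have hpre' : ∀ row ∈ (r :: rest), 0 < row.length ∧
          (4 ≤ r.length ∧ row.getD 0 0 = row.getD (row.length - 1) 0 ∧ row.getD 0 0 ≠ 0 →
            r.length - 1 ≤ row.length) := by
        rcases hpre with h | h | h
        · omega
        · simp only [List.headD_cons] at h; omega
        · simpa using h
      refine pv_row_eq r.length hsmall.2 row (fun htrig => ?_)
      by_cases hw3 : r.length = 3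
      · exact Or.inl hw3
      · exact Or.inr ((hpre' row hrow).2 ⟨by omega, htrig⟩)
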